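-- pv_equiv track=rewrite | github.com/wangzizhe/GateForge | gateforge/agent_modelica_decision_attribution_v1.py | _wasted_rounds
-- ===== SOURCE A (Python) =====
-- def _wasted_rounds(attempts: list[dict]) -> int:
--     """Count rounds where the observed failure type did not change from the previous round."""
--     wasted = 0
--     prev_type = None
--     for attempt in attempts:
--         cur_type = str(attempt.get("observed_failure_type") or "")
--         if prev_type is not None and cur_type == prev_type and cur_type:
--             wasted += 1
--         prev_type = cur_type
--     return wasted
-- ===== SOURCE B (Python) =====
-- def _wasted_rounds(attempts: list[dict]) -> int:
--     """Count rounds where the observed failure type did not change from the previous round.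
--
--     Run-length grouping: split the normalized failure-type sequence into maximal
--     runs of equal values; each non-empty-typed run of length L wastes L - 1 rounds.
--     """
--     types = [str(a.get("observed_failure_type") or "") for a in attempts]
--     wasted = 0
--     while types:
--         t = types[0]
--         k = 1
--         while k < len(types) and types[k] == t:
--             k += 1
--         if t:
--             wasted += k - 1
--         types = types[k:]
--     return wasted
-- ===== Notes on version B (the rewrite author's own statement) =====
-- stated objective: alternative
-- what changed: Replaces A's prev_type-carrying single pass over items with run-length grouping: materialize the normalized failure-type list, split it into maximal runs of equal values, and add (run length - 1) for each run with a non-empty type.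
import Mathlib
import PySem

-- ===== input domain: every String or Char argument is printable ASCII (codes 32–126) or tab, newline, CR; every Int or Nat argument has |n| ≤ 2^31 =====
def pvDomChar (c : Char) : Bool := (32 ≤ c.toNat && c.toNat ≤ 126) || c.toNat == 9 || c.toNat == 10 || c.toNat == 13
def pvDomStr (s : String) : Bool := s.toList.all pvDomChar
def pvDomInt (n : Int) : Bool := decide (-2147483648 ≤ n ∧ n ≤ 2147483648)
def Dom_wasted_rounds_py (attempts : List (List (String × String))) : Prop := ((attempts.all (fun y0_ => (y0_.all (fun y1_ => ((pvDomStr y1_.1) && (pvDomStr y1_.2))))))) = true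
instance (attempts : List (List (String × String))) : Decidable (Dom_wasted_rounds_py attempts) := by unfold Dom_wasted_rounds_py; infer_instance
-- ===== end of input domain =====

-- Header: B replaces A's prev_type-accumulator pass with run-length grouping (each non-empty run of length L wastes L-1); objective: alternative decomposition, same cost.


-- ===== PORT A =====
-- cur_type = str(attempt.get("observed_failure_type") or "") : values are strings, so
-- `x or ""` maps a missing key (None) to "" and leaves strings (incl. "") unchanged; str is identity.
def wasted_rounds_py (attempts : List (List (String × String))) : Int :=
  (attempts.foldl (fun (st : Int × Option String) attempt =>
      let cur := ((PySem.Dict.mk attempt).get? "observed_failure_type").getD ""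
      let wasted := if st.2 ≠ none ∧ st.2 = some cur ∧ cur ≠ "" then st.1 + 1 else st.1
      (wasted, some cur)) (0, none)).1

-- ===== PORT B =====
-- outer `while types` loop = recursion on the remaining suffix; the inner
-- `while k < len(types) and types[k] == t` loop = takeWhile-length over the tail;
-- `types = types[k:]` = dropping the run (drop (k-1) of the tail).
def pvRunsB : List String → Int
  | [] => 0
  | t :: rest =>
      let k := (rest.takeWhile (fun x => x == t)).length + 1
      (if t ≠ "" then (k : Int) - 1 else 0) + pvRunsB (rest.drop (k - 1))
termination_by l => l.length
decreasing_by simp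

def wasted_rounds_py_alt (attempts : List (List (String × String))) : Int :=
  let types := attempts.map (fun a => ((PySem.Dict.mk a).get? "observed_failure_type").getD "")
  pvRunsB types

-- ===== PRECONDITION & SPEC =====
def Spec_wasted_rounds_py (attempts : List (List (String × String))) (out : Int) : Prop := out = wasted_rounds_py_alt attempts
instance (attempts : List (List (String × String))) (out : Int) : Decidable (Spec_wasted_rounds_py attempts out) := by unfold Spec_wasted_rounds_py; infer_instance

-- ===== CLAIM (what is proved, stated in full; the proofs are below) =====
def Claim_equal_wasted_rounds_py : Prop := ∀ (attempts : List (List (String × String))), Dom_wasted_rounds_py attempts → Spec_wasted_rounds_py attempts (wasted_rounds_py attempts)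

-- ===== LEMMAS AND PROOFS =====

-- unfolding equations for the well-founded pvRunsB
lemma pvRunsB_nil : pvRunsB [] = 0 := by
  conv_lhs => unfold pvRunsB

lemma pvRunsB_cons (t : String) (rest : List String) : pvRunsB (t :: rest) =
    (if t ≠ "" then (((rest.takeWhile (fun x => x == t)).length + 1 : Nat) : Int) - 1 else 0)
      + pvRunsB (rest.drop ((rest.takeWhile (fun x => x == t)).length + 1 - 1)) := by
  conv_lhs => unfold pvRunsB

-- adjacent-pair count: common characterisation of A's result
def pvCnt : List String → Int
  | x :: y :: rest => (if x = y ∧ y ≠ "" then 1 else 0) + pvCnt (y :: rest)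
  | _ => 0

def pvStepA (st : Int × Option String) (cur : String) : Int × Option String :=
  (if st.2 ≠ none ∧ st.2 = some cur ∧ cur ≠ "" then st.1 + 1 else st.1, some cur)

lemma pvA_some (ts : List String) : ∀ (w : Int) (p : String),
    (ts.foldl pvStepA (w, some p)).1 = w + pvCnt (p :: ts) := by
  induction ts with
  | nil => intro w p; simp [pvCnt]
  | cons c rest ih =>
    intro w p
    by_cases h : p = c ∧ c ≠ "" <;>
      simp [List.foldl, pvStepA, h, ih, pvCnt] <;> ring

lemma pvA_cnt (ts : List String) : (ts.foldl pvStepA (0, none)).1 = pvCnt ts := by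
  cases ts with
  | nil => simp [pvCnt]
  | cons c rest =>
    have : pvStepA (0, none) c = (0, some c) := by simp [pvStepA]
    simp only [List.foldl, this, pvA_some]
    ring

-- a run of p copies of t followed by s whose head differs from t
lemma pvCnt_run (t : String) (p s : List String) (hp : ∀ x ∈ p, x = t)
    (hs : ∀ h, s.head? = some h → h ≠ t) :
    pvCnt (t :: (p ++ s)) = (if t ≠ "" then (p.length : Int) else 0) + pvCnt s := by
  induction p with
  | nil =>
    cases s with
    | nil => simp [pvCnt]
    | cons h s' =>
      have hht : ¬(t = h ∧ h ≠ "") := fun ⟨h1, _⟩ => hs h rfl h1.symm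
      simp [pvCnt, hht]
  | cons x p' ih =>
    have hx : x = t := hp x (by simp)
    subst hx
    have ih' := ih (fun y hy => hp y (List.mem_cons_of_mem _ hy))
    by_cases ht : x = ""
    · subst ht
      simp [pvCnt, List.cons_append] at ih' ⊢
      exact ih'
    · simp [pvCnt, List.cons_append, ih', ht]
      ring

lemma head_dropWhile (q : String → Bool) :
    ∀ (l : List String) (h : String), (l.dropWhile q).head? = some h → q h = false := by
  intro l
  induction l with
  | nil => intro h hh; simp [List.dropWhile] at hh
  | cons x xs ih =>
    intro h hh
    by_cases hx : q x
    · exact ih h (by simpa [List.dropWhile, hx] using hh)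
    · simp [List.dropWhile, hx] at hh
      subst hh
      simpa using hx

lemma drop_takeWhile (q : String → Bool) :
    ∀ (l : List String), l.drop (l.takeWhile q).length = l.dropWhile q := by
  intro l
  induction l with
  | nil => simp
  | cons x xs ih => by_cases hx : q x <;> simp [hx, ih]

lemma pvRunsB_eq_pvCnt : ∀ (ts : List String), pvRunsB ts = pvCnt ts := by
  intro ts
  induction hn : ts.length using Nat.strong_induction_on generalizing ts with
  | _ n ih =>
  cases ts with
  | nil => simp [pvRunsB_nil, pvCnt]
  | cons t rest =>
    have hsplit : rest.takeWhile (fun x => x == t) ++ rest.dropWhile (fun x => x == t) = rest :=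
      List.takeWhile_append_dropWhile
    have hlen : (rest.dropWhile (fun x => x == t)).length < n := by
      have h1 : (rest.dropWhile (fun x => x == t)).length ≤ rest.length :=
        List.length_dropWhile_le _ _
      simp at hn; omega
    have hrec := ih _ hlen (rest.dropWhile (fun x => x == t)) rfl
    have hp : ∀ x ∈ rest.takeWhile (fun x => x == t), x = t := by
      intro x hx
      simpa using List.mem_takeWhile_imp hx
    have hs : ∀ h, (rest.dropWhile (fun x => x == t)).head? = some h → h ≠ t := by
      intro h hh
      simpa using head_dropWhile (fun x => x == t) rest h hh
    have hcnt := pvCnt_run t (rest.takeWhile (fun x => x == t))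
      (rest.dropWhile (fun x => x == t)) hp hs
    rw [hsplit] at hcnt
    rw [pvRunsB_cons, Nat.add_sub_cancel, drop_takeWhile, hrec, hcnt]
    by_cases ht : t = "" <;> simp [ht]

-- ===== VERDICT (by name: the statement is the Claim_ definition above) =====
theorem wasted_rounds_py_spec : Claim_equal_wasted_rounds_py := by
  intro attempts _
  show wasted_rounds_py attempts = wasted_rounds_py_alt attempts
  change (attempts.foldl
      (fun st a => pvStepA st (((PySem.Dict.mk a).get? "observed_failure_type").getD "")) (0, none)).1 =
    pvRunsB (attempts.map (fun a => ((PySem.Dict.mk a).get? "observed_failure_type").getD ""))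
  rw [← List.foldl_map, pvA_cnt, pvRunsB_eq_pvCnt]
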